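-- pv_equiv track=rewrite | github.com/khyyaatii/DermaScan- | utils.py | get_product_category_guess
-- ===== SOURCE A (Python) =====
-- def get_product_category_guess(ingredients: list) -> str:
--     """Guess product type from ingredient profile."""
--     ing_lower = [i.lower() for i in ingredients]
--
--     has_spf = any(x in ing_lower for x in ["titanium dioxide", "zinc oxide", "oxybenzone", "avobenzone"])
--     has_retinol = "retinol" in ing_lower
--     has_aha_bha = any(x in ing_lower for x in ["glycolic acid", "salicylic acid", "lactic acid"])
--     has_heavy_emollient = any(x in ing_lower for x in ["shea butter", "beeswax", "carnauba"])
--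
--     if has_spf:
--         return "☀️ Sunscreen / SPF Product"
--     elif has_retinol:
--         return "🌙 Retinol / Anti-aging Treatment"
--     elif has_aha_bha:
--         return "✨ Chemical Exfoliant / Toner"
--     elif has_heavy_emollient:
--         return "💧 Moisturizer / Body Cream"
--     else:
--         return "🧴 Skincare Product"
-- ===== SOURCE B (Python) =====
-- PRIORITY = {
--     "titanium dioxide": 0, "zinc oxide": 0, "oxybenzone": 0, "avobenzone": 0,
--     "retinol": 1,
--     "glycolic acid": 2, "salicylic acid": 2, "lactic acid": 2,
--     "shea butter": 3, "beeswax": 3, "carnauba": 3,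
-- }
--
-- LABELS = [
--     "\u2600\ufe0f Sunscreen / SPF Product",
--     "\U0001f319 Retinol / Anti-aging Treatment",
--     "\u2728 Chemical Exfoliant / Toner",
--     "\U0001f4a7 Moisturizer / Body Cream",
--     "\U0001f9f4 Skincare Product",
-- ]
--
-- def get_product_category_guess(ingredients: list) -> str:
--     """Guess product type: single pass keeping the best (lowest) priority seen."""
--     best = 4
--     for i in ingredients:
--         best = min(best, PRIORITY.get(i.lower(), 4))
--     return LABELS[best]
-- ===== Notes on version B (the rewrite author's own statement) =====
-- stated objective: alternative
-- what changed: Instead of four keyword-group membership scans over the ingredient list followed by an if-elif chain, B makes one pass over the ingredients keeping the minimum priority rank (via a keyword-to-rank dict) and indexes a label table with that rank.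
import Mathlib
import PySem

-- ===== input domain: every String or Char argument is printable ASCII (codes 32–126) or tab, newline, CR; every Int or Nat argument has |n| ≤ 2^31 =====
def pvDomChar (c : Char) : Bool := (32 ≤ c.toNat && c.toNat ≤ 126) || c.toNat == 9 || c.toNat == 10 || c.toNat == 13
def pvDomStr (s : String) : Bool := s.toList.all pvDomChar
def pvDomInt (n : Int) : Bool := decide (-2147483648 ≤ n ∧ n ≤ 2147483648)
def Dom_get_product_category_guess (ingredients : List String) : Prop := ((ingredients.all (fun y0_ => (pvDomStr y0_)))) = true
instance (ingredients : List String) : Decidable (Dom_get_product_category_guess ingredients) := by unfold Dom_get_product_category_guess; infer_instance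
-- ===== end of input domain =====

-- B replaces A's four keyword-group scans + if-elif chain with ONE pass over the
-- ingredients keeping the minimum priority rank, then indexes a label table (objective: alternative).

-- ===== PORT A =====
def get_product_category_guess (ingredients : List String) : String :=
  let ing_lower := ingredients.map PySem.Str.lower
  let has_spf := ["titanium dioxide", "zinc oxide", "oxybenzone", "avobenzone"].any (fun x => ing_lower.contains x)
  let has_retinol := ing_lower.contains "retinol"
  let has_aha_bha := ["glycolic acid", "salicylic acid", "lactic acid"].any (fun x => ing_lower.contains x)
  let has_heavy_emollient := ["shea butter", "beeswax", "carnauba"].any (fun x => ing_lower.contains x)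
  if has_spf then "☀️ Sunscreen / SPF Product"
  else if has_retinol then "🌙 Retinol / Anti-aging Treatment"
  else if has_aha_bha then "✨ Chemical Exfoliant / Toner"
  else if has_heavy_emollient then "💧 Moisturizer / Body Cream"
  else "🧴 Skincare Product"

-- ===== PORT B =====
def pvPriority : PySem.Dict String Int := PySem.Dict.ofList
  [ ("titanium dioxide", 0), ("zinc oxide", 0), ("oxybenzone", 0), ("avobenzone", 0),
    ("retinol", 1),
    ("glycolic acid", 2), ("salicylic acid", 2), ("lactic acid", 2),
    ("shea butter", 3), ("beeswax", 3), ("carnauba", 3) ]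

def pvLabels : List String :=
  [ "☀️ Sunscreen / SPF Product", "🌙 Retinol / Anti-aging Treatment",
    "✨ Chemical Exfoliant / Toner", "💧 Moisturizer / Body Cream", "🧴 Skincare Product" ]

def get_product_category_guess_alt (ingredients : List String) : String :=
  let best := ingredients.foldl
    (fun b i => min b (PySem.Dict.getD pvPriority (PySem.Str.lower i) 4)) (4 : Int)
  -- LABELS[best]: best is always in [0,4], so the index never raises; getD "" is never the default
  (PySem.List.pyGet? pvLabels best).getD ""

-- ===== PRECONDITION & SPEC =====
def Spec_get_product_category_guess (ingredients : List String) (out : String) : Prop := out = get_product_category_guess_alt ingredients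
instance (ingredients : List String) (out : String) : Decidable (Spec_get_product_category_guess ingredients out) := by unfold Spec_get_product_category_guess; infer_instance

-- ===== CLAIM (what is proved, stated in full; the proofs are below) =====
def Claim_equal_get_product_category_guess : Prop := ∀ (ingredients : List String), Dom_get_product_category_guess ingredients → Spec_get_product_category_guess ingredients (get_product_category_guess ingredients)

-- ===== LEMMAS AND PROOFS =====
-- the priority rank of one (already lowercased) ingredient, as an explicit case split
lemma pvPrio_eq (s : String) :
    PySem.Dict.getD pvPriority s 4 =
      if s = "titanium dioxide" ∨ s = "zinc oxide" ∨ s = "oxybenzone" ∨ s = "avobenzone" then 0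
      else if s = "retinol" then 1
      else if s = "glycolic acid" ∨ s = "salicylic acid" ∨ s = "lactic acid" then 2
      else if s = "shea butter" ∨ s = "beeswax" ∨ s = "carnauba" then 3
      else 4 := by
  have hd : pvPriority = PySem.Dict.mk
    [ ("titanium dioxide", 0), ("zinc oxide", 0), ("oxybenzone", 0), ("avobenzone", 0),
      ("retinol", 1),
      ("glycolic acid", 2), ("salicylic acid", 2), ("lactic acid", 2),
      ("shea butter", 3), ("beeswax", 3), ("carnauba", 3) ] := by decide
  rw [hd]
  simp only [PySem.Dict.getD, PySem.Dict.get?_mk_cons, beq_iff_eq]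
  by_cases h0 : s = "titanium dioxide"
  · subst h0; decide
  rw [if_neg (fun e => h0 e.symm)]
  by_cases h1 : s = "zinc oxide"
  · subst h1; decide
  rw [if_neg (fun e => h1 e.symm)]
  by_cases h2 : s = "oxybenzone"
  · subst h2; decide
  rw [if_neg (fun e => h2 e.symm)]
  by_cases h3 : s = "avobenzone"
  · subst h3; decide
  rw [if_neg (fun e => h3 e.symm)]
  by_cases h4 : s = "retinol"
  · subst h4; decide
  rw [if_neg (fun e => h4 e.symm)]
  by_cases h5 : s = "glycolic acid"
  · subst h5; decide
  rw [if_neg (fun e => h5 e.symm)]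
  by_cases h6 : s = "salicylic acid"
  · subst h6; decide
  rw [if_neg (fun e => h6 e.symm)]
  by_cases h7 : s = "lactic acid"
  · subst h7; decide
  rw [if_neg (fun e => h7 e.symm)]
  by_cases h8 : s = "shea butter"
  · subst h8; decide
  rw [if_neg (fun e => h8 e.symm)]
  by_cases h9 : s = "beeswax"
  · subst h9; decide
  rw [if_neg (fun e => h9 e.symm)]
  by_cases h10 : s = "carnauba"
  · subst h10; decide
  rw [if_neg (fun e => h10 e.symm)]
  simp [PySem.Dict.get?, h0,h1,h2,h3,h4,h5,h6,h7,h8,h9,h10]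

lemma pvPrio_nonneg (s : String) : 0 ≤ PySem.Dict.getD pvPriority s 4 := by
  rw [pvPrio_eq]; split_ifs <;> norm_num

lemma pvPrio_le_zero (s : String) :
    PySem.Dict.getD pvPriority s 4 ≤ 0 ↔
      s = "titanium dioxide" ∨ s = "zinc oxide" ∨ s = "oxybenzone" ∨ s = "avobenzone" := by
  rw [pvPrio_eq]; split_ifs <;> simp_all

lemma pvPrio_le_one (s : String) :
    PySem.Dict.getD pvPriority s 4 ≤ 1 ↔
      (s = "titanium dioxide" ∨ s = "zinc oxide" ∨ s = "oxybenzone" ∨ s = "avobenzone") ∨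
      s = "retinol" := by
  rw [pvPrio_eq]; split_ifs <;> simp_all

lemma pvPrio_le_two (s : String) :
    PySem.Dict.getD pvPriority s 4 ≤ 2 ↔
      (s = "titanium dioxide" ∨ s = "zinc oxide" ∨ s = "oxybenzone" ∨ s = "avobenzone") ∨
      s = "retinol" ∨ (s = "glycolic acid" ∨ s = "salicylic acid" ∨ s = "lactic acid") := by
  rw [pvPrio_eq]; split_ifs <;> simp_all

lemma pvPrio_le_three (s : String) :
    PySem.Dict.getD pvPriority s 4 ≤ 3 ↔
      (s = "titanium dioxide" ∨ s = "zinc oxide" ∨ s = "oxybenzone" ∨ s = "avobenzone") ∨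
      s = "retinol" ∨ (s = "glycolic acid" ∨ s = "salicylic acid" ∨ s = "lactic acid") ∨
      (s = "shea butter" ∨ s = "beeswax" ∨ s = "carnauba") := by
  rw [pvPrio_eq]; split_ifs <;> simp_all

lemma fold_nonneg (l : List String) (b : Int) (hb : 0 ≤ b) :
    0 ≤ l.foldl (fun b i => min b (PySem.Dict.getD pvPriority (PySem.Str.lower i) 4)) b := by
  induction l generalizing b with
  | nil => exact hb
  | cons x xs ih => exact ih _ (le_min hb (pvPrio_nonneg _))

lemma fold_le_iff (l : List String) (b k : Int) :
    l.foldl (fun b i => min b (PySem.Dict.getD pvPriority (PySem.Str.lower i) 4)) b ≤ k ↔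
      b ≤ k ∨ ∃ i ∈ l, PySem.Dict.getD pvPriority (PySem.Str.lower i) 4 ≤ k := by
  induction l generalizing b with
  | nil => simp
  | cons x xs ih =>
    simp only [List.foldl_cons, ih, min_le_iff, List.mem_cons]
    constructor
    · rintro ((h | h) | ⟨i, hi, h⟩)
      · exact Or.inl h
      · exact Or.inr ⟨x, Or.inl rfl, h⟩
      · exact Or.inr ⟨i, Or.inr hi, h⟩
    · rintro (h | ⟨i, rfl | hi, h⟩)
      · exact Or.inl (Or.inl h)
      · exact Or.inl (Or.inr h)
      · exact Or.inr ⟨i, hi, h⟩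

-- ===== VERDICT (by name: the statement is the Claim_ definition above) =====
theorem get_product_category_guess_spec : Claim_equal_get_product_category_guess := by
  intro l _
  unfold Spec_get_product_category_guess
  simp only [get_product_category_guess, get_product_category_guess_alt]
  set F := l.foldl (fun b i => min b (PySem.Dict.getD pvPriority (PySem.Str.lower i) 4)) (4 : Int) with hF
  have hnn : 0 ≤ F := fold_nonneg l 4 (by norm_num)
  have e0 : (["titanium dioxide", "zinc oxide", "oxybenzone", "avobenzone"].any
      (fun x => (l.map PySem.Str.lower).contains x) = true) ↔ F ≤ 0 := by
    rw [hF, fold_le_iff]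
    simp only [List.any_eq_true, List.contains_eq_mem, List.mem_map, decide_eq_true_eq,
      pvPrio_le_zero]
    constructor
    · rintro ⟨x, hx, i, hi, rfl⟩
      refine Or.inr ⟨i, hi, ?_⟩
      simpa using hx
    · rintro (h | ⟨i, hi, h⟩)
      · omega
      · exact ⟨PySem.Str.lower i, by simpa using h, i, hi, rfl⟩
  have e1 : ((l.map PySem.Str.lower).contains "retinol" = true) ↔
      (∃ i ∈ l, PySem.Str.lower i = "retinol") := by
    simp [List.contains_eq_mem, List.mem_map, eq_comm]
  have e2 : (["glycolic acid", "salicylic acid", "lactic acid"].any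
      (fun x => (l.map PySem.Str.lower).contains x) = true) ↔
      (∃ i ∈ l, PySem.Str.lower i = "glycolic acid" ∨ PySem.Str.lower i = "salicylic acid" ∨
        PySem.Str.lower i = "lactic acid") := by
    simp only [List.any_eq_true, List.contains_eq_mem, List.mem_map, decide_eq_true_eq]
    constructor
    · rintro ⟨x, hx, i, hi, rfl⟩
      exact ⟨i, hi, by simpa using hx⟩
    · rintro ⟨i, hi, h⟩
      exact ⟨PySem.Str.lower i, by simpa using h, i, hi, rfl⟩
  have e3 : (["shea butter", "beeswax", "carnauba"].any
      (fun x => (l.map PySem.Str.lower).contains x) = true) ↔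
      (∃ i ∈ l, PySem.Str.lower i = "shea butter" ∨ PySem.Str.lower i = "beeswax" ∨
        PySem.Str.lower i = "carnauba") := by
    simp only [List.any_eq_true, List.contains_eq_mem, List.mem_map, decide_eq_true_eq]
    constructor
    · rintro ⟨x, hx, i, hi, rfl⟩
      exact ⟨i, hi, by simpa using hx⟩
    · rintro ⟨i, hi, h⟩
      exact ⟨PySem.Str.lower i, by simpa using h, i, hi, rfl⟩
  by_cases c0 : ∃ i ∈ l, PySem.Str.lower i = "titanium dioxide" ∨ PySem.Str.lower i = "zinc oxide" ∨
      PySem.Str.lower i = "oxybenzone" ∨ PySem.Str.lower i = "avobenzone"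
  · have hF0 : F = 0 := by
      have : F ≤ 0 := by
        rw [hF, fold_le_iff]
        obtain ⟨i, hi, h⟩ := c0
        exact Or.inr ⟨i, hi, (pvPrio_le_zero _).mpr h⟩
      omega
    have : (["titanium dioxide", "zinc oxide", "oxybenzone", "avobenzone"].any
        (fun x => (l.map PySem.Str.lower).contains x)) = true := by
      rw [e0, hF0]
    rw [if_pos this, hF0]
    decide
  · have hA0 : ¬ (["titanium dioxide", "zinc oxide", "oxybenzone", "avobenzone"].any
        (fun x => (l.map PySem.Str.lower).contains x)) = true := by
      intro h
      have hle := e0.mp h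
      rw [hF, fold_le_iff] at hle
      rcases hle with h | ⟨i, hi, h⟩
      · omega
      · exact c0 ⟨i, hi, (pvPrio_le_zero _).mp h⟩
    rw [if_neg hA0]
    have hnot0 : ¬ F ≤ 0 := by
      intro h
      rw [hF, fold_le_iff] at h
      rcases h with h | ⟨i, hi, h⟩
      · omega
      · exact c0 ⟨i, hi, (pvPrio_le_zero _).mp h⟩
    by_cases c1 : ∃ i ∈ l, PySem.Str.lower i = "retinol"
    · have hF1 : F = 1 := by
        have : F ≤ 1 := by
          rw [hF, fold_le_iff]
          obtain ⟨i, hi, h⟩ := c1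
          exact Or.inr ⟨i, hi, (pvPrio_le_one _).mpr (Or.inr h)⟩
        omega
      rw [if_pos (e1.mpr c1), hF1]
      decide
    · rw [if_neg (fun h => c1 (e1.mp h))]
      have hnot1 : ¬ F ≤ 1 := by
        intro h
        rw [hF, fold_le_iff] at h
        rcases h with h | ⟨i, hi, h⟩
        · omega
        · rcases (pvPrio_le_one _).mp h with h | h
          · exact c0 ⟨i, hi, h⟩
          · exact c1 ⟨i, hi, h⟩
      by_cases c2 : ∃ i ∈ l, PySem.Str.lower i = "glycolic acid" ∨
          PySem.Str.lower i = "salicylic acid" ∨ PySem.Str.lower i = "lactic acid"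
      · have hF2 : F = 2 := by
          have : F ≤ 2 := by
            rw [hF, fold_le_iff]
            obtain ⟨i, hi, h⟩ := c2
            exact Or.inr ⟨i, hi, (pvPrio_le_two _).mpr (Or.inr (Or.inr h))⟩
          omega
        rw [if_pos (e2.mpr c2), hF2]
        decide
      · rw [if_neg (fun h => c2 (e2.mp h))]
        have hnot2 : ¬ F ≤ 2 := by
          intro h
          rw [hF, fold_le_iff] at h
          rcases h with h | ⟨i, hi, h⟩
          · omega
          · rcases (pvPrio_le_two _).mp h with h | h | h
            · exact c0 ⟨i, hi, h⟩
            · exact c1 ⟨i, hi, h⟩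
            · exact c2 ⟨i, hi, h⟩
        by_cases c3 : ∃ i ∈ l, PySem.Str.lower i = "shea butter" ∨
            PySem.Str.lower i = "beeswax" ∨ PySem.Str.lower i = "carnauba"
        · have hF3 : F = 3 := by
            have : F ≤ 3 := by
              rw [hF, fold_le_iff]
              obtain ⟨i, hi, h⟩ := c3
              exact Or.inr ⟨i, hi, (pvPrio_le_three _).mpr (Or.inr (Or.inr (Or.inr h)))⟩
            omega
          rw [if_pos (e3.mpr c3), hF3]
          decide
        · rw [if_neg (fun h => c3 (e3.mp h))]
          have hF4 : F = 4 := by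
            have hle : F ≤ 4 := by rw [hF, fold_le_iff]; exact Or.inl le_rfl
            have hnot3 : ¬ F ≤ 3 := by
              intro h
              rw [hF, fold_le_iff] at h
              rcases h with h | ⟨i, hi, h⟩
              · omega
              · rcases (pvPrio_le_three _).mp h with h | h | h | h
                · exact c0 ⟨i, hi, h⟩
                · exact c1 ⟨i, hi, h⟩
                · exact c2 ⟨i, hi, h⟩
                · exact c3 ⟨i, hi, h⟩
            omega
          rw [hF4]
          decide
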